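-- pv_equiv track=rewrite | github.com/Noble14/aoc | 2023/day13/first.py | line_sym
-- ===== SOURCE A (Python) =====
-- def line_sym(line, i):
--     j = 1
--     l = True
--     end = min(len(line)-i, i)+1
--     while j < end  and l:
--         if line[i-j] != line[i+j-1]:
--             l = False
--         j += 1
--     return l
-- ===== SOURCE B (Python) =====
-- def line_sym(line, i):
--     n = min(i, len(line) - i)
--     if n <= 0:
--         return True
--     return line[i-n:i][::-1] == line[i:i+n]
-- ===== Notes on version B (the rewrite author's own statement) =====
-- stated objective: idiomatic
-- what changed: Replaces the outward-stepping indexed while-loop with a single slice comparison: the reversed left slice line[i-n:i][::-1] is compared to line[i:i+n] where n = min(i, len(line)-i).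
import Mathlib
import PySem

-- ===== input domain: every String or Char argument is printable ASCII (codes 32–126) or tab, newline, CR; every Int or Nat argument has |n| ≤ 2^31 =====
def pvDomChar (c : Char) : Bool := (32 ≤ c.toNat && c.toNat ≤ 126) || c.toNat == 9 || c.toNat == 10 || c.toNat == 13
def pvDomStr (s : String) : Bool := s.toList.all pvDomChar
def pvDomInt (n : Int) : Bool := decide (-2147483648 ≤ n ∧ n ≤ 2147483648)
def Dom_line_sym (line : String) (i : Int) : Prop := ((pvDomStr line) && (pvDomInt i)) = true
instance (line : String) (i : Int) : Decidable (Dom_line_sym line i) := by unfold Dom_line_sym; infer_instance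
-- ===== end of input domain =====

-- B replaces A's outward-stepping indexed while-loop by one slice comparison
-- (reversed left slice vs right slice); same cost, more idiomatic.

-- ===== PORT A =====
-- while j < end and l: if line[i-j] != line[i+j-1]: l = False; j += 1
def lineSymLoop (cs : List Char) (i endv j : Int) (l : Bool) : Bool :=
  if _h : j < endv ∧ l = true then
    lineSymLoop cs i endv (j + 1)
      (if PySem.List.pyGet? cs (i - j) ≠ PySem.List.pyGet? cs (i + j - 1) then false else l)
  else l
termination_by (endv - j).toNat
decreasing_by omega

def line_sym (line : String) (i : Int) : Bool :=
  let cs := line.toList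
  lineSymLoop cs i (min ((cs.length : Int) - i) i + 1) 1 true

-- ===== PORT B =====
def line_sym_alt (line : String) (i : Int) : Bool :=
  let cs := line.toList
  let n := min i ((cs.length : Int) - i)
  if n ≤ 0 then true
  else (PySem.List.slice cs (some (i - n)) (some i)).reverse
         == PySem.List.slice cs (some i) (some (i + n))

-- ===== PRECONDITION & SPEC =====
def Spec_line_sym (line : String) (i : Int) (out : Bool) : Prop := out = line_sym_alt line i
instance (line : String) (i : Int) (out : Bool) : Decidable (Spec_line_sym line i out) := by unfold Spec_line_sym; infer_instance

-- ===== CLAIM (what is proved, stated in full; the proofs are below) =====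
def Claim_equal_line_sym : Prop := ∀ (line : String) (i : Int), Dom_line_sym line i → Spec_line_sym line i (line_sym line i)

-- ===== LEMMAS AND PROOFS =====

theorem lineSymLoop_false (cs : List Char) (i endv j : Int) :
    lineSymLoop cs i endv j false = false := by
  rw [lineSymLoop]; simp

theorem lineSymLoop_true_iff (cs : List Char) (i endv : Int) (m : Nat) :
    ∀ j : Int, endv - j ≤ (m : Int) →
    (lineSymLoop cs i endv j true = true ↔
      ∀ k : Int, j ≤ k → k < endv →
        PySem.List.pyGet? cs (i - k) = PySem.List.pyGet? cs (i + k - 1)) := by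
  induction m with
  | zero =>
    intro j hj
    rw [lineSymLoop]
    have : ¬ (j < endv ∧ True) := by omega
    simp only [and_true] at this ⊢
    constructor
    · intro _ k hk1 hk2; omega
    · intro _; rw [dif_neg (by simpa using this)]
  | succ m ih =>
    intro j hj
    by_cases hlt : j < endv
    · rw [lineSymLoop]
      rw [dif_pos ⟨hlt, rfl⟩]
      by_cases heq : PySem.List.pyGet? cs (i - j) = PySem.List.pyGet? cs (i + j - 1)
      · rw [if_neg (by simpa using heq)]
        rw [ih (j + 1) (by omega)]
        constructor
        · intro h k hk1 hk2
          rcases eq_or_lt_of_le hk1 with h' | h'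
          · subst h'; exact heq
          · exact h k (by omega) hk2
        · intro h k hk1 hk2; exact h k (by omega) hk2
      · rw [if_pos (by simpa using heq), lineSymLoop_false]
        constructor
        · intro h; exact absurd h (by simp)
        · intro h; exact absurd (h j le_rfl hlt) heq
    · rw [lineSymLoop]
      rw [dif_neg (by simp only [and_true]; omega)]
      constructor
      · intro _ k hk1 hk2; omega
      · intro _; rfl

theorem line_sym_spec : Claim_equal_line_sym := by
  intro line i _
  unfold Spec_line_sym line_sym line_sym_alt
  set cs := line.toList with hcs
  set L : Int := (cs.length : Int) with hL
  set n : Int := min i (L - i) with hn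
  simp only []
  have hend : min (L - i) i + 1 = n + 1 := by rw [hn, min_comm]
  rw [hend]
  have hloop := lineSymLoop_true_iff cs i (n + 1) ((n + 1 - 1).toNat) 1 (by omega)
  by_cases hle : n ≤ 0
  · rw [if_pos hle]
    rw [(lineSymLoop_true_iff cs i (n + 1) 0 1 (by omega)).2 (by intro k hk1 hk2; omega)]
  · rw [if_neg hle]
    -- n ≥ 1 : indices in range
    have hn1 : 1 ≤ n := by omega
    have hiL : n ≤ i ∧ n ≤ L - i := ⟨min_le_left _ _, min_le_right _ _⟩
    obtain ⟨hni, hnLi⟩ := hiL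
    have hi0 : 0 ≤ i := by omega
    have hiLe : i ≤ L := by omega
    obtain ⟨N, hnN⟩ : ∃ N : Nat, n = (N : Int) := ⟨n.toNat, by omega⟩
    obtain ⟨I, hiI⟩ : ∃ I : Nat, i = (I : Int) := ⟨i.toNat, by omega⟩
    have hNle : N ≤ I := by omega
    have hINlen : I + N ≤ cs.length := by omega
    have h1N : 1 ≤ N := by omega
    -- rewrite the slices
    have hs1 : PySem.List.slice cs (some (i - n)) (some i)
        = (cs.drop (I - N)).take N := by
      rw [PySem.List.slice_toNat cs (by omega) hi0,
          show (i - n).toNat = I - N from by omega, show i.toNat = I from by omega,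
          show I - (I - N) = N from by omega]
    have hs2 : PySem.List.slice cs (some i) (some (i + n))
        = (cs.drop I).take N := by
      rw [PySem.List.slice_toNat cs hi0 (by omega),
          show (i + n).toNat = I + N from by omega, show i.toNat = I from by omega,
          show I + N - I = N from by omega]
    rw [hs1, hs2]
    -- lengths
    have hlen1 : ((cs.drop (I - N)).take N).length = N := by
      simp [List.length_take, List.length_drop]; omega
    have hlen2 : ((cs.drop I).take N).length = N := by
      simp [List.length_take, List.length_drop]; omega
    -- common pairwise characterization
    have hB : (((cs.drop (I - N)).take N).reverse == (cs.drop I).take N) = true ↔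
        (∀ m : Nat, m < N → cs[I - 1 - m]? = cs[I + m]?) := by
      rw [beq_iff_eq]
      constructor
      · intro h m hm
        have := congrArg (fun l => l[m]?) h
        simp only [List.getElem?_reverse (by omega : m < (((cs.drop (I-N)).take N)).length ) ] at this
        rw [hlen1] at this
        rw [List.getElem?_take, List.getElem?_take] at this
        rw [if_pos (by omega), if_pos hm] at this
        rw [List.getElem?_drop, List.getElem?_drop] at this
        have e1 : I - N + (N - 1 - m) = I - 1 - m := by omega
        rw [e1] at this; exact this
      · intro h
        apply List.ext_getElem?
        intro m
        by_cases hm : m < N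
        · rw [List.getElem?_reverse (by rw [hlen1]; omega)]
          rw [hlen1]
          rw [List.getElem?_take, List.getElem?_take,
              if_pos (by omega), if_pos hm,
              List.getElem?_drop, List.getElem?_drop]
          have e1 : I - N + (N - 1 - m) = I - 1 - m := by omega
          rw [e1]; exact h m hm
        · rw [List.getElem?_eq_none (by simp [hlen1]; omega),
              List.getElem?_eq_none (by rw [hlen2]; omega)]
    have hA : lineSymLoop cs i (n + 1) 1 true = true ↔
        (∀ m : Nat, m < N → cs[I - 1 - m]? = cs[I + m]?) := by
      rw [hloop]
      constructor
      · intro h m hm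
        have := h ((m : Int) + 1) (by omega) (by omega)
        rw [PySem.List.pyGet?_of_nonneg cs (by omega),
            PySem.List.pyGet?_of_nonneg cs (by omega)] at this
        have e1 : (i - ((m : Int) + 1)).toNat = I - 1 - m := by omega
        have e2 : (i + ((m : Int) + 1) - 1).toNat = I + m := by omega
        rw [e1, e2] at this; exact this
      · intro h k hk1 hk2
        have hm : (k - 1).toNat < N := by omega
        have := h (k - 1).toNat hm
        rw [PySem.List.pyGet?_of_nonneg cs (by omega),
            PySem.List.pyGet?_of_nonneg cs (by omega)]
        have e1 : (i - k).toNat = I - 1 - (k - 1).toNat := by omega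
        have e2 : (i + k - 1).toNat = I + (k - 1).toNat := by omega
        rw [e1, e2]; exact this
    exact Bool.eq_iff_iff.mpr (hA.trans hB.symm)
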